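-- pv_equiv track=rewrite | github.com/macsimir/INFA | 23/4.py | task
-- ===== SOURCE A (Python) =====
-- def task(start, end):
--     if start > end:
--         return 0
--     if start == 27:
--         return 0
--     if start == end:
--         return 1
--     if start < end:
--         return task(start+2, end)+task(start*2, end)
-- ===== SOURCE B (Python) =====
-- def task(start, end):
--     memo = {}
--     def go(s):
--         if s > end:
--             return 0
--         if s == 27:
--             return 0
--         if s == end:
--             return 1
--         if s in memo:
--             return memo[s]
--         r = go(s + 2) + go(s * 2)
--         memo[s] = r
--         return r
--     return go(start)
-- ===== Notes on version B (the rewrite author's own statement) =====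
-- stated objective: faster
-- what changed: B memoizes the recursion in a dictionary so each start value is counted once, replacing A's naive double-branching recursion.
import Mathlib
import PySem

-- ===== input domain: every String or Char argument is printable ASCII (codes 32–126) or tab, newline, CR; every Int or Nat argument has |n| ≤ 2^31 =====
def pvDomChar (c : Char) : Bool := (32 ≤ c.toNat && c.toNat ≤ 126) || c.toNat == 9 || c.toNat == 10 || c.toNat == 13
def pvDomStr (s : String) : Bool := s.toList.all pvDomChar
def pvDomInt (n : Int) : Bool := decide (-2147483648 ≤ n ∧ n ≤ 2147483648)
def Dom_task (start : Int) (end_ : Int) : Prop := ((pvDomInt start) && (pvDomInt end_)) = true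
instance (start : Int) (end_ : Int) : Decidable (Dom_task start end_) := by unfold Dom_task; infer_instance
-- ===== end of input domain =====

-- B memoizes the recursion in a dict, turning A's exponential branching into one visit per value; proved equal on Pre_.


-- ===== PORT A =====
-- fuel makes the recursion total in Lean; under Pre_task the fuel (end_-start).toNat+1 always suffices (proved below)
def taskF : Nat → Int → Int → Int
  | 0, _, _ => 0
  | n+1, start, end_ =>
    if start > end_ then 0
    else if start = 27 then 0
    else if start = end_ then 1
    else taskF n (start+2) end_ + taskF n (start*2) end_

def task (start : Int) (end_ : Int) : Int := taskF ((end_ - start).toNat + 1) start end_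

-- ===== PORT B =====
-- go, with the mutable memo dict threaded through explicitly; same fuel discipline as A's port
def taskAltF : Nat → PySem.Dict Int Int → Int → Int → Int × PySem.Dict Int Int
  | 0, m, _, _ => (0, m)
  | n+1, m, s, end_ =>
    if s > end_ then (0, m)
    else if s = 27 then (0, m)
    else if s = end_ then (1, m)
    else
      match m.get? s with
      | some v => (v, m)
      | none =>
        let p1 := taskAltF n m (s+2) end_
        let p2 := taskAltF n p1.2 (s*2) end_
        (p1.1 + p2.1, p2.2.insert s (p1.1 + p2.1))

def task_alt (start : Int) (end_ : Int) : Int :=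
  (taskAltF ((end_ - start).toNat + 1) PySem.Dict.empty start end_).1

-- ===== PRECONDITION & SPEC =====
-- Pre_ excludes start ≤ 0 < end_, where the *2 branch never progresses and Python A (and B) hit RecursionError.
def Pre_task (start : Int) (end_ : Int) : Prop := 1 ≤ start ∨ end_ ≤ start
instance (start : Int) (end_ : Int) : Decidable (Pre_task start end_) := by unfold Pre_task; infer_instance
def pvWitness_task : Int × Int := (1, 20)

def Spec_task (start : Int) (end_ : Int) (out : Int) : Prop := out = task_alt start end_
instance (start : Int) (end_ : Int) (out : Int) : Decidable (Spec_task start end_ out) := by unfold Spec_task; infer_instance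

-- ===== CLAIM (what is proved, stated in full; the proofs are below) =====
def Claim_equal_task : Prop := ∀ (start : Int) (end_ : Int), Dom_task start end_ → Pre_task start end_ → Spec_task start end_ (task start end_)

-- ===== LEMMAS AND PROOFS =====

-- any sufficient fuel computes the same value as any other sufficient fuel, for 1 ≤ s
lemma taskF_irrel : ∀ (n m : Nat) (s e : Int), 1 ≤ s → (e - s).toNat < n → (e - s).toNat < m →
    taskF n s e = taskF m s e := by
  intro n
  induction n with
  | zero => intro m s e _ h; omega
  | succ k ih =>
    intro m s e hs hn hm
    cases m with
    | zero => omega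
    | succ l =>
      simp only [taskF]
      split_ifs with h1 h2 h3
      · rfl
      · rfl
      · rfl
      · have hlt : s < e := lt_of_le_of_ne (not_lt.mp h1) h3
        have hd : e - s*2 ≤ e - s - 1 := by nlinarith
        rw [ih l (s+2) e (by omega) (by omega) (by omega),
            ih l (s*2) e (by omega) (by omega) (by omega)]

-- unfolding equation for task under Pre_ in the recursive case
lemma task_unfold (s e : Int) (hs : 1 ≤ s) (hlt : s < e) (h27 : s ≠ 27) :
    task s e = task (s+2) e + task (s*2) e := by
  have hd : e - s*2 ≤ e - s - 1 := by nlinarith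
  show taskF ((e - s).toNat + 1) s e = _
  have hn : 0 < (e - s).toNat + 1 := Nat.succ_pos _
  obtain ⟨n, hn'⟩ : ∃ n, (e - s).toNat + 1 = n + 1 := ⟨(e - s).toNat, rfl⟩
  rw [hn']
  simp only [taskF]
  rw [if_neg (by omega), if_neg h27, if_neg (by omega)]
  unfold task
  rw [taskF_irrel n ((e - (s+2)).toNat + 1) (s+2) e (by omega) (by omega) (by omega),
      taskF_irrel n ((e - s*2).toNat + 1) (s*2) e (by omega) (by omega) (by omega)]

-- the memo invariant: every stored value is the true count for its key
def MemoInv (e : Int) (m : PySem.Dict Int Int) : Prop :=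
  ∀ k v, m.get? k = some v → v = task k e

lemma memo_correct : ∀ (n : Nat) (s e : Int) (m : PySem.Dict Int Int),
    Pre_task s e → (e - s).toNat < n → MemoInv e m →
    (taskAltF n m s e).1 = task s e ∧ MemoInv e (taskAltF n m s e).2 := by
  intro n
  induction n with
  | zero => intro s e m _ h; omega
  | succ k ih =>
    intro s e m hpre hn hinv
    simp only [taskAltF]
    by_cases h1 : s > e
    · rw [if_pos h1]
      refine ⟨?_, hinv⟩
      show (0:Int) = task s e
      unfold task
      obtain ⟨n0, hn0⟩ : ∃ n0, (e - s).toNat + 1 = n0 + 1 := ⟨(e - s).toNat, rfl⟩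
      rw [hn0]; simp only [taskF]; rw [if_pos h1]
    · rw [if_neg h1]
      by_cases h2 : s = 27
      · rw [if_pos h2]
        refine ⟨?_, hinv⟩
        show (0:Int) = task s e
        unfold task
        obtain ⟨n0, hn0⟩ : ∃ n0, (e - s).toNat + 1 = n0 + 1 := ⟨(e - s).toNat, rfl⟩
        rw [hn0]; simp only [taskF]; rw [if_neg h1, if_pos h2]
      · rw [if_neg h2]
        by_cases h3 : s = e
        · rw [if_pos h3]
          refine ⟨?_, hinv⟩
          show (1:Int) = task s e
          unfold task
          obtain ⟨n0, hn0⟩ : ∃ n0, (e - s).toNat + 1 = n0 + 1 := ⟨(e - s).toNat, rfl⟩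
          rw [hn0]; simp only [taskF]; rw [if_neg h1, if_neg h2, if_pos h3]
        · rw [if_neg h3]
          have hlt : s < e := lt_of_le_of_ne (not_lt.mp h1) h3
          have hs : 1 ≤ s := by rcases hpre with h | h; exact h; omega
          have hd : e - s*2 ≤ e - s - 1 := by nlinarith
          cases hget : m.get? s with
          | some v =>
            exact ⟨hinv s v hget, hinv⟩
          | none =>
            have r1 := ih (s+2) e m (Or.inl (by omega)) (by omega) hinv
            have r2 := ih (s*2) e (taskAltF k m (s+2) e).2 (Or.inl (by omega)) (by omega) r1.2
            constructor
            · show (taskAltF k m (s+2) e).1 + (taskAltF k (taskAltF k m (s+2) e).2 (s*2) e).1 = task s e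
              rw [r1.1, r2.1, task_unfold s e hs hlt h2]
            · intro key v hkey
              show v = task key e
              by_cases hk : key = s
              · rw [hk] at hkey ⊢
                rw [PySem.Dict.get?_insert_self] at hkey
                have : v = (taskAltF k m (s+2) e).1 + (taskAltF k (taskAltF k m (s+2) e).2 (s*2) e).1 := by
                  simpa using hkey.symm
                rw [this, r1.1, r2.1, task_unfold s e hs hlt h2]
              · rw [PySem.Dict.get?_insert_of_ne _ _ hk] at hkey
                exact r2.2 key v hkey

theorem task_spec : Claim_equal_task := by
  intro s e _ hpre
  unfold Spec_task task_alt
  exact (memo_correct ((e - s).toNat + 1) s e PySem.Dict.empty hpre (by omega)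
    (by intro k v h; simp [PySem.Dict.get?_empty] at h)).1.symm
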